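-- pv_equiv track=rewrite | github.com/wehnsdaefflae/rebalancing | source/dtw.py | stretch
-- ===== SOURCE A (Python) =====
-- def stretch(series_a, series_b, path):
--     new_a, new_b = [series_a[0]], [series_b[0]]
--     i, j = 0, 0
--     for each_d in path:
--         if each_d == 0:
--             i += 1
--             j += 1
--         elif each_d == 1:
--             i += 1
--         elif each_d == -1:
--             j += 1
--         new_a.append(series_a[i])
--         new_b.append(series_b[j])
--     return new_a, new_b
-- ===== SOURCE B (Python) =====
-- def stretch(series_a, series_b, path):
--     # build the two index paths first (prefix sums over the step codes), then gather
--     i_idx = [0]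
--     j_idx = [0]
--     for d in path:
--         i_idx.append(i_idx[-1] + (d == 0 or d == 1))
--         j_idx.append(j_idx[-1] + (d == 0 or d == -1))
--     return [series_a[k] for k in i_idx], [series_b[k] for k in j_idx]
-- ===== Notes on version B (the rewrite author's own statement) =====
-- stated objective: alternative
-- what changed: B separates index-path construction from value lookup: it first builds the two index sequences as running prefix sums over the direction codes, then produces both outputs by gathering, instead of interleaving index advancement with appends in one loop.
import Mathlib
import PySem

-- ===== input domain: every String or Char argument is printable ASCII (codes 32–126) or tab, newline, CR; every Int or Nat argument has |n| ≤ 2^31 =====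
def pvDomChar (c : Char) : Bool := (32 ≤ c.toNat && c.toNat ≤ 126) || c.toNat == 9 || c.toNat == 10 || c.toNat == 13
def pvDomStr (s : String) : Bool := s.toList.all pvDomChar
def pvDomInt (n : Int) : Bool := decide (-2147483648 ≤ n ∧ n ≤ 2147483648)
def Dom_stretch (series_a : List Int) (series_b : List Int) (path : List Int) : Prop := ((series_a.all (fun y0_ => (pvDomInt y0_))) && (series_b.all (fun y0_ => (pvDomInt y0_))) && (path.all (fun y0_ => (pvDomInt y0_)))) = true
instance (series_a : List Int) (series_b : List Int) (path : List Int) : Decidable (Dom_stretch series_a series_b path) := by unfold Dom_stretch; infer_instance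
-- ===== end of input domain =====

-- B builds the two index paths as prefix sums and then gathers; same values as A everywhere A returns.

-- ===== PORT A =====
-- one loop iteration of A: advance i/j by the direction code, append series values
def stepA (series_a series_b : List Int) (st : List Int × List Int × Int × Int) (d : Int) :
    List Int × List Int × Int × Int :=
  let ij : Int × Int :=
    if d = 0 then (st.2.2.1 + 1, st.2.2.2 + 1)
    else if d = 1 then (st.2.2.1 + 1, st.2.2.2)
    else if d = -1 then (st.2.2.1, st.2.2.2 + 1)
    else (st.2.2.1, st.2.2.2)
  (st.1 ++ [(PySem.List.pyGet? series_a ij.1).getD 0],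
   st.2.1 ++ [(PySem.List.pyGet? series_b ij.2).getD 0], ij.1, ij.2)

def stretch (series_a : List Int) (series_b : List Int) (path : List Int) : List Int × List Int :=
  let st := path.foldl (stepA series_a series_b)
    ([(PySem.List.pyGet? series_a 0).getD 0], [(PySem.List.pyGet? series_b 0).getD 0], 0, 0)
  (st.1, st.2.1)

-- ===== PORT B =====
-- one loop iteration of B: extend each index path by its last value plus the step's contribution
def stepB (st : List Int × List Int) (d : Int) : List Int × List Int :=
  (st.1 ++ [(PySem.List.pyGet? st.1 (-1)).getD 0 + (if d = 0 ∨ d = 1 then 1 else 0)],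
   st.2 ++ [(PySem.List.pyGet? st.2 (-1)).getD 0 + (if d = 0 ∨ d = -1 then 1 else 0)])

def stretch_alt (series_a : List Int) (series_b : List Int) (path : List Int) : List Int × List Int :=
  let idx := path.foldl stepB ([0], [0])
  (idx.1.map (fun k => (PySem.List.pyGet? series_a k).getD 0),
   idx.2.map (fun k => (PySem.List.pyGet? series_b k).getD 0))

-- ===== PRECONDITION & SPEC =====
-- exactly the inputs on which the Python A returns (the running indices stay in range;
-- their maxima are the total counts of {0,1}- resp. {0,-1}-codes in the path)
def Pre_stretch (series_a : List Int) (series_b : List Int) (path : List Int) : Prop :=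
  path.countP (fun d => d == 0 || d == 1) < series_a.length ∧
  path.countP (fun d => d == 0 || d == -1) < series_b.length
instance (series_a : List Int) (series_b : List Int) (path : List Int) : Decidable (Pre_stretch series_a series_b path) := by unfold Pre_stretch; infer_instance

def pvWitness_stretch : List Int × List Int × List Int := ([1, 2, 3], [4, 5], [1, 0])

def Spec_stretch (series_a : List Int) (series_b : List Int) (path : List Int) (out : List Int × List Int) : Prop := out = stretch_alt series_a series_b path
instance (series_a : List Int) (series_b : List Int) (path : List Int) (out : List Int × List Int) : Decidable (Spec_stretch series_a series_b path out) := by unfold Spec_stretch; infer_instance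

-- ===== CLAIM (what is proved, stated in full; the proofs are below) =====
def Claim_equal_stretch : Prop := ∀ (series_a : List Int) (series_b : List Int) (path : List Int), Dom_stretch series_a series_b path → Pre_stretch series_a series_b path → Spec_stretch series_a series_b path (stretch series_a series_b path)

-- ===== LEMMAS AND PROOFS =====

-- the core invariant: if A's state is B's two index lists mapped through the lookups,
-- with i/j the last indices, then one step preserves this
theorem stretch_fold_eq (series_a series_b : List Int) :
    ∀ (path I J : List Int) (i j : Int), I.getLast? = some i → J.getLast? = some j →
    path.foldl (stepA series_a series_b)
      (I.map (fun k => (PySem.List.pyGet? series_a k).getD 0),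
       J.map (fun k => (PySem.List.pyGet? series_b k).getD 0), i, j)
    = ((path.foldl stepB (I, J)).1.map (fun k => (PySem.List.pyGet? series_a k).getD 0),
       (path.foldl stepB (I, J)).2.map (fun k => (PySem.List.pyGet? series_b k).getD 0),
       ((path.foldl stepB (I, J)).1.getLast?).getD 0,
       ((path.foldl stepB (I, J)).2.getLast?).getD 0) := by
  intro path
  induction path with
  | nil =>
    intro I J i j hI hJ
    simp [hI, hJ]
  | cons d rest ih =>
    intro I J i j hI hJ
    have hBI : (PySem.List.pyGet? I (-1)).getD 0 = i := by
      rw [PySem.List.pyGet?_neg_one, hI]; rfl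
    have hBJ : (PySem.List.pyGet? J (-1)).getD 0 = j := by
      rw [PySem.List.pyGet?_neg_one, hJ]; rfl
    have step : stepA series_a series_b
        (I.map (fun k => (PySem.List.pyGet? series_a k).getD 0),
         J.map (fun k => (PySem.List.pyGet? series_b k).getD 0), i, j) d
        = ((stepB (I, J) d).1.map (fun k => (PySem.List.pyGet? series_a k).getD 0),
           (stepB (I, J) d).2.map (fun k => (PySem.List.pyGet? series_b k).getD 0),
           i + (if d = 0 ∨ d = 1 then 1 else 0), j + (if d = 0 ∨ d = -1 then 1 else 0)) := by
      simp only [stepA, stepB, hBI, hBJ, List.map_append, List.map_cons, List.map_nil]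
      by_cases h0 : d = 0 <;> by_cases h1 : d = 1 <;> by_cases hm : d = -1 <;>
        simp_all
    have hlastI : (stepB (I, J) d).1.getLast? = some (i + (if d = 0 ∨ d = 1 then 1 else 0)) := by
      simp [stepB, hBI]
    have hlastJ : (stepB (I, J) d).2.getLast? = some (j + (if d = 0 ∨ d = -1 then 1 else 0)) := by
      simp [stepB, hBJ]
    calc (d :: rest).foldl (stepA series_a series_b) _
        = rest.foldl (stepA series_a series_b)
            ((stepB (I, J) d).1.map (fun k => (PySem.List.pyGet? series_a k).getD 0),
             (stepB (I, J) d).2.map (fun k => (PySem.List.pyGet? series_b k).getD 0),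
             i + (if d = 0 ∨ d = 1 then 1 else 0), j + (if d = 0 ∨ d = -1 then 1 else 0)) := by
          rw [List.foldl_cons, step]
      _ = _ := by
          rw [ih (stepB (I, J) d).1 (stepB (I, J) d).2 _ _ hlastI hlastJ]
          simp [List.foldl_cons]

-- ===== VERDICT (by name: the statement is the Claim_ definition above) =====
theorem stretch_spec : Claim_equal_stretch := by
  intro series_a series_b path _ _
  unfold Spec_stretch stretch stretch_alt
  have h := stretch_fold_eq series_a series_b path [0] [0] 0 0 rfl rfl
  simp only [List.map_cons, List.map_nil] at h
  simp [h]
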